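-- pv_equiv track=rewrite | github.com/UziLoogies/Price-Error-Bot | src/ingest/filters.py | is_clearance_section
-- ===== SOURCE A (Python) =====
-- def is_clearance_section(category_name: str, url: str) -> bool:
--     """
--     Detect if category is a clearance section.
--
--     Args:
--         category_name: Category name
--         url: Category URL
--
--     Returns:
--         True if appears to be clearance section
--     """
--     text = f"{category_name} {url}".lower()
--     clearance_keywords = [
--         "clearance",
--         "closeout",
--         "final sale",
--         "liquidation",
--         "overstock",
--     ]
--     return any(keyword in text for keyword in clearance_keywords)
-- ===== SOURCE B (Python) =====
-- _KEYWORDS_BY_FIRST = {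
--     "c": ("clearance", "closeout"),
--     "f": ("final sale",),
--     "l": ("liquidation",),
--     "o": ("overstock",),
-- }
--
--
-- def is_clearance_section(category_name: str, url: str) -> bool:
--     """Single left-to-right scan: at each position, dispatch on the current
--     character to the (at most two) keywords that could start there and test
--     them with startswith, instead of five independent substring searches."""
--     text = f"{category_name} {url}".lower()
--     for i, ch in enumerate(text):
--         for kw in _KEYWORDS_BY_FIRST.get(ch, ()):
--             if text.startswith(kw, i):
--                 return True
--     return False
-- ===== Notes on version B (the rewrite author's own statement) =====
-- stated objective: alternative
-- what changed: Replaces A's five independent substring searches (any(kw in text)) with a single left-to-right scan of the text that dispatches on the current character to the keywords able to start there and tests them with startswith.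
import Mathlib
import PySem

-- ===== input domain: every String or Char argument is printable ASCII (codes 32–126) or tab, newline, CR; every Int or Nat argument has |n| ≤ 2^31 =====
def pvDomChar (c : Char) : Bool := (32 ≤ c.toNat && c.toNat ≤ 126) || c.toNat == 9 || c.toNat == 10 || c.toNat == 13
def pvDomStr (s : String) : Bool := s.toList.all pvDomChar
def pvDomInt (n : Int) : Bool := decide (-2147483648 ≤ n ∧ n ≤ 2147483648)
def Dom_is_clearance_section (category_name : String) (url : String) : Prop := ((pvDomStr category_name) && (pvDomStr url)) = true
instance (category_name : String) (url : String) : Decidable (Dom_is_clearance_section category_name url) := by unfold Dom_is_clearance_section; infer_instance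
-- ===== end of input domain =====

-- B replaces A's five independent substring searches by one left-to-right scan
-- with a first-character dispatch; same return value everywhere (alternative, not claimed faster).

-- ===== PORT A =====
-- f"{category_name} {url}".lower(), as a list of chars (PySem.Chars.lower is exact on the ASCII domain)
def pvClearanceKeywords : List (List Char) :=
  ["clearance".toList, "closeout".toList, "final sale".toList, "liquidation".toList, "overstock".toList]

def is_clearance_section (category_name : String) (url : String) : Bool :=
  let text := PySem.Chars.lower (category_name.toList ++ ' ' :: url.toList)
  pvClearanceKeywords.any (fun kw => PySem.Chars.isIn kw text)

-- ===== PORT B =====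
-- _KEYWORDS_BY_FIRST.get(ch, ())
def pvKwsFor (c : Char) : List (List Char) :=
  if c = 'c' then ["clearance".toList, "closeout".toList]
  else if c = 'f' then ["final sale".toList]
  else if c = 'l' then ["liquidation".toList]
  else if c = 'o' then ["overstock".toList]
  else []

-- the 'for i, ch in enumerate(text)' scan: at each suffix, test the dispatched keywords with startswith
def pvScanClearance : List Char → Bool
  | [] => false
  | c :: rest =>
      (pvKwsFor c).any (fun kw => PySem.Chars.startswith (c :: rest) kw) || pvScanClearance rest

def is_clearance_section_alt (category_name : String) (url : String) : Bool :=
  pvScanClearance (PySem.Chars.lower (category_name.toList ++ ' ' :: url.toList))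

-- ===== PRECONDITION & SPEC =====
def Spec_is_clearance_section (category_name : String) (url : String) (out : Bool) : Prop := out = is_clearance_section_alt category_name url
instance (category_name : String) (url : String) (out : Bool) : Decidable (Spec_is_clearance_section category_name url out) := by unfold Spec_is_clearance_section; infer_instance

-- ===== CLAIM (what is proved, stated in full; the proofs are below) =====
def Claim_equal_is_clearance_section : Prop := ∀ (category_name : String) (url : String), Dom_is_clearance_section category_name url → Spec_is_clearance_section category_name url (is_clearance_section category_name url)

-- ===== LEMMAS AND PROOFS =====

-- a keyword whose first char differs from the head of the suffix cannot start there
theorem pv_st_ne (c k0 : Char) (rest kw : List Char)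
    (hh : kw.head? = some k0) (h : ¬ k0 = c) :
    PySem.Chars.startswith (c :: rest) kw = false := by
  cases kw with
  | nil => simp at hh
  | cons a t =>
    rw [List.head?_cons, Option.some.injEq] at hh
    subst hh
    rw [Bool.eq_false_iff]
    intro hst
    exact h (List.cons_prefix_cons.mp ((PySem.Chars.startswith_iff _ _).mp hst)).1

-- 'kw in s' unfolds one suffix step: match at the head position, or in the tail
theorem pv_isIn_cons (kw : List Char) (c : Char) (rest : List Char) :
    PySem.Chars.isIn kw (c :: rest) =
      (PySem.Chars.startswith (c :: rest) kw || PySem.Chars.isIn kw rest) := by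
  rw [Bool.eq_iff_iff, Bool.or_eq_true, PySem.Chars.isIn_iff_infix, PySem.Chars.isIn_iff_infix,
      PySem.Chars.startswith_iff, List.infix_cons_iff]

-- the scan computes exactly 'some keyword occurs in s'
theorem pv_scan_eq (s : List Char) :
    pvScanClearance s = pvClearanceKeywords.any (fun kw => PySem.Chars.isIn kw s) := by
  induction s with
  | nil => decide
  | cons c rest ih =>
    simp only [pvScanClearance, ih, pvClearanceKeywords, pvKwsFor, List.any_cons, List.any_nil,
      pv_isIn_cons]
    by_cases hc : c = 'c'
    · subst hc
      rw [if_pos rfl,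
        pv_st_ne 'c' 'f' rest "final sale".toList (by decide) (by decide),
        pv_st_ne 'c' 'l' rest "liquidation".toList (by decide) (by decide),
        pv_st_ne 'c' 'o' rest "overstock".toList (by decide) (by decide)]
      simp only [List.any_cons, List.any_nil, Bool.or_false, Bool.false_or]
      ac_rfl
    · rw [if_neg hc]
      by_cases hf : c = 'f'
      · subst hf
        rw [if_pos rfl,
          pv_st_ne 'f' 'c' rest "clearance".toList (by decide) (by decide),
          pv_st_ne 'f' 'c' rest "closeout".toList (by decide) (by decide),
          pv_st_ne 'f' 'l' rest "liquidation".toList (by decide) (by decide),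
          pv_st_ne 'f' 'o' rest "overstock".toList (by decide) (by decide)]
        simp only [List.any_cons, List.any_nil, Bool.or_false, Bool.false_or]
        ac_rfl
      · rw [if_neg hf]
        by_cases hl : c = 'l'
        · subst hl
          rw [if_pos rfl,
            pv_st_ne 'l' 'c' rest "clearance".toList (by decide) (by decide),
            pv_st_ne 'l' 'c' rest "closeout".toList (by decide) (by decide),
            pv_st_ne 'l' 'f' rest "final sale".toList (by decide) (by decide),
            pv_st_ne 'l' 'o' rest "overstock".toList (by decide) (by decide)]
          simp only [List.any_cons, List.any_nil, Bool.or_false, Bool.false_or]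
          ac_rfl
        · rw [if_neg hl]
          by_cases ho : c = 'o'
          · subst ho
            rw [if_pos rfl,
              pv_st_ne 'o' 'c' rest "clearance".toList (by decide) (by decide),
              pv_st_ne 'o' 'c' rest "closeout".toList (by decide) (by decide),
              pv_st_ne 'o' 'f' rest "final sale".toList (by decide) (by decide),
              pv_st_ne 'o' 'l' rest "liquidation".toList (by decide) (by decide)]
            simp only [List.any_cons, List.any_nil, Bool.or_false, Bool.false_or]
            ac_rfl
          · rw [if_neg ho,
              pv_st_ne c 'c' rest "clearance".toList (by decide) (fun h => hc h.symm),
              pv_st_ne c 'c' rest "closeout".toList (by decide) (fun h => hc h.symm),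
              pv_st_ne c 'f' rest "final sale".toList (by decide) (fun h => hf h.symm),
              pv_st_ne c 'l' rest "liquidation".toList (by decide) (fun h => hl h.symm),
              pv_st_ne c 'o' rest "overstock".toList (by decide) (fun h => ho h.symm)]
            simp only [List.any_nil, Bool.false_or]

-- ===== VERDICT (by name: the statement is the Claim_ definition above) =====
theorem is_clearance_section_spec : Claim_equal_is_clearance_section := by
  intro category_name url _
  unfold Spec_is_clearance_section is_clearance_section is_clearance_section_alt
  rw [pv_scan_eq]
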